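-- pv_equiv track=rewrite | github.com/Kibazola/EP2-2025-NOVO | funçõesEP2.py | calcula_pontos_sequencia_alta
-- ===== SOURCE A (Python) =====
-- def calcula_pontos_sequencia_alta(lista_n):
--         lista_n = lista_n.copy()
--         ii = 0
--         lista_n2 = []
--         while ii < len(lista_n):
--             i = 0
--             m = lista_n[0]
--             while i < len(lista_n):
--                 if lista_n[i] <= m:
--                     m = lista_n[i]
--                     indice = i
--                 i += 1
--             lista_n2.append(m)
--             del lista_n[indice]
--             ii = 0
--
--         seq = 0
--         i = 1
--         seq_final = 0
--         while i < len(lista_n2):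
--             if lista_n2[i] - lista_n2[i - 1] == 1:
--                 seq += 1
--                 if seq > seq_final:
--                     seq_final = seq
--             elif lista_n2[i] - lista_n2[i - 1] > 1:
--                 seq = 0
--             i += 1
--         if seq_final >= 4:
--             return 30
--         else:
--             return 0
-- ===== SOURCE B (Python) =====
-- def calcula_pontos_sequencia_alta(lista_n):
--     s = set(lista_n)
--     for v in s:
--         if all(v + k in s for k in range(1, 5)):
--             return 30
--     return 0
-- ===== Notes on version B (the rewrite author's own statement) =====
-- stated objective: faster
-- what changed: Replaces A's O(n^2) repeated-min selection sort plus a run-length scan by a hash-set membership test: return 30 iff some value v in the set has v+1..v+4 all present.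
import Mathlib
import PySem

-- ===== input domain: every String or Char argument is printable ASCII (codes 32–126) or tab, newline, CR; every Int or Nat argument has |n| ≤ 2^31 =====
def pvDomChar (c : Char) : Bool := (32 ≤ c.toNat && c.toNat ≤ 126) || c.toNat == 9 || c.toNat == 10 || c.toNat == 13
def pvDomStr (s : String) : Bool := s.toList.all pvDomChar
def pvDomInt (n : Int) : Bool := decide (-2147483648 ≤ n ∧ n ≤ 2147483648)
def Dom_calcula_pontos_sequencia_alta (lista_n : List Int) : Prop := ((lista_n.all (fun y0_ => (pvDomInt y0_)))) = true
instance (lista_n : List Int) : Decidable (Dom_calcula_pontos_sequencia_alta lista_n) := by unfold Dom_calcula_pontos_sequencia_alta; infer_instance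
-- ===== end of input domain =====

-- B replaces A's O(n^2) selection sort + run scan by a single set-membership test
-- (30 iff some v has v+1..v+4 also present); proved to return the same value on every input.


-- ===== PORT A =====
-- inner `while i < len(lista_n)` loop of A: scans (value, index) pairs carrying (m, indice);
-- Python leaves `indice` uninitialised before the loop, but the first iteration (lista_n[0] <= m)
-- always sets it to 0, so starting the accumulator at indice = 0 is exact.
def pvMinLoop : List (Int × Nat) → Int → Nat → Int × Nat
  | [], m, ind => (m, ind)
  | (x, i) :: rest, m, ind => if x ≤ m then pvMinLoop rest x i else pvMinLoop rest m ind

-- the index returned by pvMinLoop stays a valid index (needed for termination of pvSelSort)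
theorem pvMinLoop_snd_lt (ps : List (Int × Nat)) (m : Int) (ind N : Nat)
    (hind : ind < N) (hps : ∀ p ∈ ps, p.2 < N) : (pvMinLoop ps m ind).2 < N := by
  induction ps generalizing m ind with
  | nil => exact hind
  | cons p rest ih =>
    obtain ⟨x, i⟩ := p
    simp only [pvMinLoop]
    split
    · exact ih x i (hps (x, i) (by simp)) (fun q hq => hps q (by simp [hq]))
    · exact ih m ind hind (fun q hq => hps q (by simp [hq]))

-- outer `while ii < len(lista_n)` loop of A: repeatedly append the minimum and delete it
def pvSelSort (l : List Int) : List Int :=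
  if h : l = [] then []
  else
    let r := pvMinLoop l.zipIdx (l.headD 0) 0
    r.1 :: pvSelSort (l.eraseIdx r.2)
termination_by l.length
decreasing_by
  have hlt : ∀ m0 : Int, (pvMinLoop l.zipIdx m0 0).2 < l.length := by
    intro m0
    apply pvMinLoop_snd_lt
    · exact List.length_pos_iff.mpr h
    · intro p hp
      obtain ⟨_, h2⟩ := List.mem_zipIdx hp
      omega
  rw [List.length_eraseIdx]
  split
  · omega
  · exact absurd (hlt _) (by assumption)

-- second `while i < len(lista_n2)` loop of A, carrying (prev = lista_n2[i-1], seq, seq_final)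
def pvScan : Int → Int → Int → List Int → Int
  | _, _, seqf, [] => seqf
  | prev, seq, seqf, x :: rest =>
    if x - prev = 1 then
      pvScan x (seq + 1) (if seq + 1 > seqf then seq + 1 else seqf) rest
    else if x - prev > 1 then
      pvScan x 0 seqf rest
    else
      pvScan x seq seqf rest

def calcula_pontos_sequencia_alta (lista_n : List Int) : Int :=
  let lista_n2 := pvSelSort lista_n
  let seq_final :=
    match lista_n2 with
    | [] => 0
    | h :: t => pvScan h 0 0 t
  if seq_final ≥ 4 then 30 else 0

-- ===== PORT B =====
-- `for v in s: if all(v + k in s for k in range(1, 5)): return 30` / `return 0`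
def pvAltLoop (s : List Int) : List Int → Int
  | [] => 0
  | v :: rest =>
    if (PySem.List.pyRange 1 5 1).all (fun k => decide (v + k ∈ s)) then 30
    else pvAltLoop s rest

def calcula_pontos_sequencia_alta_alt (lista_n : List Int) : Int :=
  let s : PySem.Set Int := PySem.Set.ofList lista_n
  pvAltLoop s s

-- ===== PRECONDITION & SPEC =====
def Spec_calcula_pontos_sequencia_alta (lista_n : List Int) (out : Int) : Prop := out = calcula_pontos_sequencia_alta_alt lista_n
instance (lista_n : List Int) (out : Int) : Decidable (Spec_calcula_pontos_sequencia_alta lista_n out) := by unfold Spec_calcula_pontos_sequencia_alta; infer_instance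

-- ===== CLAIM (what is proved, stated in full; the proofs are below) =====
def Claim_equal_calcula_pontos_sequencia_alta : Prop := ∀ (lista_n : List Int), Dom_calcula_pontos_sequencia_alta lista_n → Spec_calcula_pontos_sequencia_alta lista_n (calcula_pontos_sequencia_alta lista_n)

-- ===== LEMMAS AND PROOFS =====

-- the common characterisation: five consecutive values all occur in S
def Chain5 (S : List Int) : Prop :=
  ∃ v, v ∈ S ∧ v + 1 ∈ S ∧ v + 2 ∈ S ∧ v + 3 ∈ S ∧ v + 4 ∈ S

theorem pvMinLoop_spec (g : List Int) (ps : List (Int × Nat)) (m : Int) (ind : Nat)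
    (hg : g[ind]? = some m) (hps : ∀ p ∈ ps, g[p.2]? = some p.1) :
    g[(pvMinLoop ps m ind).2]? = some (pvMinLoop ps m ind).1 ∧
    (pvMinLoop ps m ind).1 ≤ m ∧ ∀ p ∈ ps, (pvMinLoop ps m ind).1 ≤ p.1 := by
  induction ps generalizing m ind with
  | nil => exact ⟨hg, le_refl m, by simp⟩
  | cons p rest ih =>
    obtain ⟨x, i⟩ := p
    have hx : g[i]? = some x := hps (x, i) (by simp)
    have hr : ∀ q ∈ rest, g[q.2]? = some q.1 := fun q hq => hps q (by simp [hq])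
    simp only [pvMinLoop]
    split
    · rename_i hle
      obtain ⟨c1, c2, c3⟩ := ih x i hx hr
      exact ⟨c1, le_trans c2 hle, by
        intro q hq
        rcases List.mem_cons.mp hq with h | h
        · subst h; exact c2
        · exact c3 q h⟩
    · rename_i hlt
      obtain ⟨c1, c2, c3⟩ := ih m ind hg hr
      exact ⟨c1, c2, by
        intro q hq
        rcases List.mem_cons.mp hq with h | h
        · subst h; exact le_trans c2 (by omega)
        · exact c3 q h⟩

theorem pvSelSort_strong : ∀ (n : Nat) (l : List Int), l.length ≤ n →
    (pvSelSort l).Perm l ∧ (pvSelSort l).Pairwise (· ≤ ·) := by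
  intro n
  induction n with
  | zero =>
    intro l hl
    have : l = [] := List.length_eq_zero_iff.mp (Nat.le_zero.mp hl)
    subst this
    rw [pvSelSort]
    simp
  | succ n ih =>
    intro l hl
    by_cases h : l = []
    · subst h; rw [pvSelSort]; simp
    · have hg : l[0]? = some (l.headD 0) := by
        cases l with
        | nil => simp at h
        | cons a t => simp
      have hps : ∀ p ∈ l.zipIdx, l[p.2]? = some p.1 := by
        intro p hp
        exact List.mem_zipIdx_iff_getElem?.mp hp
      obtain ⟨c1, _, c3⟩ := pvMinLoop_spec l l.zipIdx (l.headD 0) 0 hg hps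
      set r := pvMinLoop l.zipIdx (l.headD 0) 0 with hr
      obtain ⟨hi2, hval⟩ := List.getElem?_eq_some_iff.mp c1
      have hmin : ∀ y ∈ l, r.1 ≤ y := by
        intro y hy
        obtain ⟨i, hi, hyi⟩ := List.mem_iff_getElem.mp hy
        exact hyi ▸ c3 (l[i], i) (List.mem_zipIdx_iff_getElem?.mpr (by simp [hi]))
      have hperm0 : (r.1 :: l.eraseIdx r.2).Perm l := hval ▸ List.getElem_cons_eraseIdx_perm hi2
      have hlen : (l.eraseIdx r.2).length ≤ n := by
        rw [List.length_eraseIdx, if_pos hi2]; omega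
      obtain ⟨ihp, ihs⟩ := ih (l.eraseIdx r.2) hlen
      have hunf : pvSelSort l = r.1 :: pvSelSort (l.eraseIdx r.2) := by
        rw [pvSelSort, dif_neg h]
      constructor
      · rw [hunf]
        exact (ihp.cons r.1).trans hperm0
      · rw [hunf]
        refine List.Pairwise.cons ?_ ihs
        intro y hy
        exact hmin y (List.mem_of_mem_eraseIdx (ihp.mem_iff.mp hy))

theorem pvScan_spec (S : List Int) (rest : List Int) (prev seq seqf : Int)
    (hseq : 0 ≤ seq) (hseqf : 0 ≤ seqf)
    (hA : ∀ j : Int, 0 ≤ j → j ≤ seq → prev - j ∈ S)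
    (hD : ∀ k : Int, 0 ≤ k → (∀ j : Int, 1 ≤ j → j ≤ k → prev - j ∈ S) → k ≤ seq)
    (hB : 4 ≤ seqf → Chain5 S)
    (hC : ∀ v : Int, v + 4 ≤ prev →
      (v ∈ S ∧ v + 1 ∈ S ∧ v + 2 ∈ S ∧ v + 3 ∈ S ∧ v + 4 ∈ S) → 4 ≤ seqf)
    (hmem : ∀ y ∈ rest, y ∈ S)
    (hsort : (prev :: rest).Pairwise (· ≤ ·))
    (hS : ∀ y ∈ S, y ≤ prev ∨ y ∈ rest) :
    (4 ≤ pvScan prev seq seqf rest ↔ Chain5 S) := by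
  induction rest generalizing prev seq seqf with
  | nil =>
    simp only [pvScan]
    constructor
    · exact hB
    · rintro ⟨v, h0, h1, h2, h3, h4⟩
      have hv4 : v + 4 ≤ prev := by
        rcases hS _ h4 with h | h
        · exact h
        · simp at h
      exact hC v hv4 ⟨h0, h1, h2, h3, h4⟩
  | cons x rest' ih =>
    have hpx : prev ≤ x := (List.pairwise_cons.mp hsort).1 x (by simp)
    have hsort' : (x :: rest').Pairwise (· ≤ ·) := (List.pairwise_cons.mp hsort).2
    have hxrest : ∀ y ∈ rest', x ≤ y := (List.pairwise_cons.mp hsort').1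
    have hxS : x ∈ S := hmem x (by simp)
    have hmem' : ∀ y ∈ rest', y ∈ S := fun y hy => hmem y (by simp [hy])
    have hS' : ∀ y ∈ S, y ≤ x ∨ y ∈ rest' := by
      intro y hy
      rcases hS y hy with h | h
      · exact Or.inl (le_trans h hpx)
      · rcases List.mem_cons.mp h with h | h
        · exact Or.inl (h ▸ le_refl x)
        · exact Or.inr h
    simp only [pvScan]
    split
    · -- x - prev = 1
      rename_i hd1
      have hx : x = prev + 1 := by omega
      apply ih x (seq + 1) _ (by omega) (by omega)
      · -- hA'
        intro j hj0 hj1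
        by_cases hj : j = 0
        · subst hj; simpa using hxS
        · have := hA (j - 1) (by omega) (by omega)
          have heq : x - j = prev - (j - 1) := by omega
          rw [heq]; exact this
      · -- hD'
        intro k hk0 hk
        by_cases hk1 : k = 0
        · omega
        · have : ∀ j : Int, 1 ≤ j → j ≤ k - 1 → prev - j ∈ S := by
            intro j hj1 hj2
            have := hk (j + 1) (by omega) (by omega)
            have heq : x - (j + 1) = prev - j := by omega
            rw [heq] at this; exact this
          have := hD (k - 1) (by omega) this
          omega
      · -- hB'
        intro hsf
        split at hsf
        · rename_i hgt
          -- seq + 1 ≥ 4, so seq ≥ 3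
          have h3 : 3 ≤ seq := by omega
          refine ⟨prev - 3, hA 3 (by omega) (by omega), ?_, ?_, ?_, ?_⟩
          · have e : prev - 3 + 1 = prev - 2 := by omega
            rw [e]; exact hA 2 (by omega) (by omega)
          · have e : prev - 3 + 2 = prev - 1 := by omega
            rw [e]; exact hA 1 (by omega) (by omega)
          · have e : prev - 3 + 3 = prev - 0 := by omega
            rw [e]; exact hA 0 (by omega) (by omega)
          · have e : prev - 3 + 4 = x := by omega
            rw [e]; exact hxS
        · exact hB hsf
      · -- hC'
        intro v hv4 hch
        by_cases hvp : v + 4 ≤ prev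
        · have := hC v hvp hch
          split <;> omega
        · have hvx : v + 4 = x := by omega
          -- chain v..v+3 lies at prev-3..prev
          have h3 : 3 ≤ seq := by
            apply hD 3 (by omega)
            intro j hj1 hj2
            interval_cases j
            · have e : prev - 1 = v + 2 := by omega
              rw [e]; exact hch.2.2.1
            · have e : prev - 2 = v + 1 := by omega
              rw [e]; exact hch.2.1
            · have e : prev - 3 = v := by omega
              rw [e]; exact hch.1
          split <;> omega
      · exact hmem'
      · exact hsort'
      · exact hS'
    · split
      · -- x - prev > 1
        rename_i hne hgt
        apply ih x 0 seqf (by omega) hseqf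
        · intro j hj0 hj1
          have : j = 0 := by omega
          subst this; simpa using hxS
        · intro k hk0 hk
          by_contra hcon
          have h1 : x - 1 ∈ S := hk 1 (by omega) (by omega)
          rcases hS _ h1 with h | h
          · omega
          · rcases List.mem_cons.mp h with h | h
            · omega
            · have := hxrest _ h; omega
        · exact hB
        · intro v hv4 hch
          by_cases hvp : v + 4 ≤ prev
          · exact hC v hvp hch
          · exfalso
            -- prev < v+4 ≤ x: impossible, since then v+3 would exceed prev yet precede x
            have hv4x : v + 4 = x := by
              rcases hS _ hch.2.2.2.2 with h | h
              · omega
              · rcases List.mem_cons.mp h with h | h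
                · omega
                · have := hxrest _ h; omega
            have hv3 : v + 3 ≤ prev := by
              rcases hS _ hch.2.2.2.1 with h | h
              · exact h
              · rcases List.mem_cons.mp h with h | h
                · omega
                · have := hxrest _ h; omega
            omega
        · exact hmem'
        · exact hsort'
        · exact hS'
      · -- x = prev
        rename_i hne hle
        have hx : x = prev := by omega
        subst hx
        exact ih x seq seqf hseq hseqf hA hD hB hC hmem' hsort' hS'

theorem pyRange15 : PySem.List.pyRange 1 5 1 = [1, 2, 3, 4] := by decide

theorem pvAltLoop_eq_30_iff (s rest : List Int) :
    pvAltLoop s rest = 30 ↔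
      ∃ v ∈ rest, v + 1 ∈ s ∧ v + 2 ∈ s ∧ v + 3 ∈ s ∧ v + 4 ∈ s := by
  induction rest with
  | nil => simp [pvAltLoop]
  | cons v rest ih =>
    simp only [pvAltLoop, pyRange15]
    by_cases h : v + 1 ∈ s ∧ v + 2 ∈ s ∧ v + 3 ∈ s ∧ v + 4 ∈ s
    · rw [if_pos (by simp [h.1, h.2.1, h.2.2.1, h.2.2.2])]
      exact iff_of_true rfl ⟨v, List.mem_cons_self, h⟩
    · rw [if_neg (by simpa using fun h1 h2 h3 h4 => h ⟨h1, h2, h3, h4⟩)]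
      rw [ih]
      constructor
      · rintro ⟨w, hw, hc⟩; exact ⟨w, by simp [hw], hc⟩
      · rintro ⟨w, hw, hc⟩
        rcases List.mem_cons.mp hw with rfl | hw
        · exact absurd hc h
        · exact ⟨w, hw, hc⟩

theorem pvAltLoop_eq_zero_of (s rest : List Int) (h : pvAltLoop s rest ≠ 30) :
    pvAltLoop s rest = 0 := by
  induction rest with
  | nil => simp [pvAltLoop]
  | cons v rest ih =>
    simp only [pvAltLoop] at *
    split at h
    · exact absurd rfl h
    · rename_i hc
      rw [if_neg hc]
      exact ih h

theorem A_iff (l : List Int) :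
    4 ≤ (match pvSelSort l with | [] => (0 : Int) | h :: t => pvScan h 0 0 t) ↔ Chain5 l := by
  obtain ⟨hperm, hsorted⟩ := pvSelSort_strong l.length l le_rfl
  cases hsel : pvSelSort l with
  | nil =>
    rw [hsel] at hperm
    have : l = [] := hperm.symm.eq_nil
    subst this
    simp [Chain5]
  | cons h t =>
    rw [hsel] at hperm hsorted
    have hmemiff : ∀ y : Int, y ∈ l ↔ y ∈ h :: t := fun y => hperm.mem_iff.symm
    have hht : ∀ y ∈ t, h ≤ y := (List.pairwise_cons.mp hsorted).1
    simp only []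
    apply pvScan_spec l t h 0 0 le_rfl le_rfl
    · intro j hj0 hj1
      have : j = 0 := by omega
      subst this
      simpa using (hmemiff h).mpr List.mem_cons_self
    · intro k hk0 hk
      by_contra hcon
      have h1 : h - 1 ∈ l := hk 1 (by omega) (by omega)
      rcases List.mem_cons.mp ((hmemiff _).mp h1) with he | he
      · omega
      · have := hht _ he; omega
    · intro hf; omega
    · intro v hv4 hch
      exfalso
      rcases List.mem_cons.mp ((hmemiff v).mp hch.1) with he | he
      · omega
      · have := hht _ he; omega
    · intro y hy
      exact (hmemiff y).mpr (by simp [hy])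
    · exact hsorted
    · intro y hy
      rcases List.mem_cons.mp ((hmemiff y).mp hy) with he | he
      · exact Or.inl (le_of_eq he)
      · exact Or.inr he

theorem B_iff (l : List Int) : calcula_pontos_sequencia_alta_alt l = 30 ↔ Chain5 l := by
  unfold calcula_pontos_sequencia_alta_alt
  rw [pvAltLoop_eq_30_iff]
  simp [PySem.Set.mem_ofList, Chain5]

-- ===== VERDICT (by name: the statement is the Claim_ definition above) =====
theorem calcula_pontos_sequencia_alta_spec : Claim_equal_calcula_pontos_sequencia_alta := by
  intro l _
  unfold Spec_calcula_pontos_sequencia_alta calcula_pontos_sequencia_alta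
  by_cases h : Chain5 l
  · have hb := (B_iff l).mpr h
    have ha := (A_iff l).mpr h
    rw [if_pos (by exact_mod_cast ha), hb]
  · have ha : ¬ 4 ≤ (match pvSelSort l with | [] => (0 : Int) | h :: t => pvScan h 0 0 t) :=
      fun hc => h ((A_iff l).mp hc)
    have hb : calcula_pontos_sequencia_alta_alt l ≠ 30 := fun hc => h ((B_iff l).mp hc)
    have hb0 : calcula_pontos_sequencia_alta_alt l = 0 :=
      pvAltLoop_eq_zero_of _ _ (fun hc => hb (by simpa [calcula_pontos_sequencia_alta_alt] using hc))
    rw [if_neg ha, hb0]
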